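-- pv_equiv track=rewrite | github.com/sionic-ai/solar-vs-glm | origin/probe_solar_vs_glm45_air.py | longest_contiguous_match
-- ===== SOURCE A (Python) =====
-- from typing import Any, Dict, List, Optional, Tuple
--
-- def longest_contiguous_match(invA: List[str], invB: List[str], offset: int) -> Tuple[int, Optional[int]]:
--     """
--     Match when invA[i] == invB[i + offset]
--     Returns (best_run_len, start_index_in_A)
--     """
--     startA = max(0, -offset)
--     endA = min(len(invA), len(invB) - offset)
--     if endA <= startA:
--         return 0, None
--
--     best = 0
--     best_start = None
--     run = 0
--     for i in range(startA, endA):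
--         if invA[i] == invB[i + offset]:
--             run += 1
--             if run > best:
--                 best = run
--                 best_start = i - run + 1
--         else:
--             run = 0
--     return best, best_start
-- ===== SOURCE B (Python) =====
-- from typing import List, Optional, Tuple
--
-- def longest_contiguous_match(invA: List[str], invB: List[str], offset: int) -> Tuple[int, Optional[int]]:
--     """Two-phase: first collect every maximal matching segment as (length, start),
--     then pick the first segment of maximal length."""
--     startA = max(0, -offset)
--     endA = min(len(invA), len(invB) - offset)
--     if endA <= startA:
--         return 0, None
--     segments = []  # (length, start) of each maximal matching run
--     i = startA
--     while i < endA: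
--         if invA[i] == invB[i + offset]:
--             j = i
--             while j < endA and invA[j] == invB[j + offset]:
--                 j += 1
--             segments.append((j - i, i))
--             i = j
--         else:
--             i += 1
--     best, best_start = 0, None
--     for length, start in segments:
--         if length > best:
--             best, best_start = length, start
--     return best, best_start
-- ===== Notes on version B (the rewrite author's own statement) =====
-- stated objective: alternative
-- what changed: A is a single left-to-right scan carrying a running match counter and updating the best on the fly; B first builds the list of maximal matching segments (length, start) with an explicit inner run scan and then selects the first segment of maximal length in a separate pass.
import Mathlib
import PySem

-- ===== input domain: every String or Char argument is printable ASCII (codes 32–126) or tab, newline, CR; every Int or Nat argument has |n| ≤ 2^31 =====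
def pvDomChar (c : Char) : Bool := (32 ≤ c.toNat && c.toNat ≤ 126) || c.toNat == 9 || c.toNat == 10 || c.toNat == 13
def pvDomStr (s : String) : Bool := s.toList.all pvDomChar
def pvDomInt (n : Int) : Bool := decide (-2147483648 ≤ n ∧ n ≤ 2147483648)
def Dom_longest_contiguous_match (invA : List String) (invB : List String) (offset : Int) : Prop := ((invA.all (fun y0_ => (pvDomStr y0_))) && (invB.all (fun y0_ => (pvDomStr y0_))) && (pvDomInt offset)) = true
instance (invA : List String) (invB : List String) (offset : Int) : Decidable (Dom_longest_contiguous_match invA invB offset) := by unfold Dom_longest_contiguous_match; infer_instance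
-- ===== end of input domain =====

-- B replaces A's single on-line scan (running counter, best updated on the fly) by a
-- two-phase alternative: collect every maximal matching segment, then pick the first longest.

-- ===== PORT A =====
-- invA[i] == invB[i + offset]; shared by both ports; indices are in range wherever evaluated
def pvMatch (invA invB : List String) (offset i : Int) : Bool :=
  PySem.List.pyGet? invA i == PySem.List.pyGet? invB (i + offset)

-- the body of A's for-loop acting on (best, best_start, run)
def pvStepA (m : Int → Bool) (s : Int × Option Int × Int) (i : Int) : Int × Option Int × Int :=
  if m i then
    let run := s.2.2 + 1
    if run > s.1 then (run, some (i - run + 1), run) else (s.1, s.2.1, run)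
  else (s.1, s.2.1, 0)

def longest_contiguous_match (invA : List String) (invB : List String) (offset : Int) : Int × Option Int :=
  let startA := max 0 (-offset)
  let endA := min (invA.length : Int) ((invB.length : Int) - offset)
  if endA ≤ startA then (0, none)
  else
    let s := (PySem.List.pyRange startA endA 1).foldl (pvStepA (pvMatch invA invB offset)) (0, none, 0)
    (s.1, s.2.1)

-- ===== PORT B =====
-- B's inner while loop: advance j while j < endA and position j matches
-- (fuel = remaining range length, makes the recursion structural; never exhausted on the stated calls)
def pvScanRunF (m : Int → Bool) (endA : Int) : Nat → Int → Int
  | 0, j => j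
  | fuel + 1, j => if j < endA ∧ m j then pvScanRunF m endA fuel (j + 1) else j

-- B's outer while loop: collect each maximal matching run as (length, start)
def pvCollectF (m : Int → Bool) (endA : Int) : Nat → Int → List (Int × Int)
  | 0, _ => []
  | fuel + 1, i =>
    if i < endA then
      if m i then
        let j := pvScanRunF m endA (fuel + 1) i
        (j - i, i) :: pvCollectF m endA fuel j
      else pvCollectF m endA fuel (i + 1)
    else []

-- B's selection pass: first segment of maximal length wins
def pvStepB (acc : Int × Option Int) (seg : Int × Int) : Int × Option Int :=
  if seg.1 > acc.1 then (seg.1, some seg.2) else acc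

def longest_contiguous_match_alt (invA : List String) (invB : List String) (offset : Int) : Int × Option Int :=
  let startA := max 0 (-offset)
  let endA := min (invA.length : Int) ((invB.length : Int) - offset)
  if endA ≤ startA then (0, none)
  else (pvCollectF (pvMatch invA invB offset) endA (endA - startA).toNat startA).foldl pvStepB (0, none)

-- ===== PRECONDITION & SPEC =====
def Spec_longest_contiguous_match (invA : List String) (invB : List String) (offset : Int) (out : Int × Option Int) : Prop := out = longest_contiguous_match_alt invA invB offset
instance (invA : List String) (invB : List String) (offset : Int) (out : Int × Option Int) : Decidable (Spec_longest_contiguous_match invA invB offset out) := by unfold Spec_longest_contiguous_match; infer_instance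

-- ===== CLAIM (what is proved, stated in full; the proofs are below) =====
def Claim_equal_longest_contiguous_match : Prop := ∀ (invA : List String) (invB : List String) (offset : Int), Dom_longest_contiguous_match invA invB offset → Spec_longest_contiguous_match invA invB offset (longest_contiguous_match invA invB offset)

-- ===== LEMMAS AND PROOFS =====

-- fuel-free well-founded mirrors of B's two loops (proof devices)
def pvScanRun (m : Int → Bool) (endA j : Int) : Int :=
  if h : j < endA ∧ m j then pvScanRun m endA (j + 1) else j
termination_by (endA - j).toNat
decreasing_by omega

theorem le_pvScanRun (m : Int → Bool) (endA j : Int) : j ≤ pvScanRun m endA j := by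
  fun_induction pvScanRun m endA j with
  | case1 j h ih => omega
  | case2 j h => omega

theorem lt_pvScanRun (m : Int → Bool) (endA j : Int) (h1 : j < endA) (h2 : m j = true) :
    j < pvScanRun m endA j := by
  rw [pvScanRun]
  have := le_pvScanRun m endA (j + 1)
  simp [h1, h2]; omega

def pvCollect (m : Int → Bool) (endA i : Int) : List (Int × Int) :=
  if hi : i < endA then
    if hm : m i then
      let j := pvScanRun m endA i
      (j - i, i) :: pvCollect m endA j
    else pvCollect m endA (i + 1)
  else []
termination_by (endA - i).toNat
decreasing_by
  · have := lt_pvScanRun m endA i hi hm; omega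
  · omega

-- with enough fuel the fueled loops compute their fuel-free mirrors
theorem pvScanRunF_eq (m : Int → Bool) (endA : Int) :
    ∀ (fuel : Nat) (j : Int), (endA - j).toNat ≤ fuel →
      pvScanRunF m endA fuel j = pvScanRun m endA j := by
  intro fuel
  induction fuel with
  | zero =>
      intro j hj
      have : ¬ (j < endA ∧ m j = true) := by
        intro h; omega
      rw [pvScanRunF, pvScanRun]
      simp [this]
  | succ fuel ih =>
      intro j hj
      rw [pvScanRunF]
      conv_rhs => rw [pvScanRun]
      by_cases h : j < endA ∧ m j = true
      · simp only [h, if_pos]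
        exact ih (j + 1) (by omega)
      · simp [h]

theorem pvCollectF_eq (m : Int → Bool) (endA : Int) :
    ∀ (fuel : Nat) (i : Int), (endA - i).toNat ≤ fuel →
      pvCollectF m endA fuel i = pvCollect m endA i := by
  intro fuel
  induction fuel with
  | zero =>
      intro i hi
      rw [pvCollectF, pvCollect]
      have : ¬ i < endA := by omega
      simp [this]
  | succ fuel ih =>
      intro i hi
      rw [pvCollectF]
      conv_rhs => rw [pvCollect]
      by_cases h1 : i < endA
      · by_cases h2 : m i = true
        · simp only [h1, h2, if_pos, dif_pos]
          have hscan := pvScanRunF_eq m endA (fuel + 1) i (by omega)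
          rw [hscan]
          have hlt := lt_pvScanRun m endA i h1 h2
          rw [ih (pvScanRun m endA i) (by omega)]
        · simp only [h1, h2, dif_pos, if_neg, Bool.not_eq_true]
          simp only [Bool.false_eq_true, if_false]
          exact ih (i + 1) (by omega)
      · simp [h1]

-- proof device: merge a pending run of length r that started at s into the segment
-- list of the remaining indices, i being the next index to be examined
def pvMerge (r s i : Int) : List (Int × Int) → List (Int × Int)
  | [] => [(r, s)]
  | (len, st) :: rest => if st = i then (r + len, s) :: rest else (r, s) :: (len, st) :: rest

theorem pvCollect_eq_pos (m : Int → Bool) (endA i : Int) (hi : i < endA) (hm : m i = true) :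
    pvCollect m endA i = (pvScanRun m endA i - i, i) :: pvCollect m endA (pvScanRun m endA i) := by
  conv_lhs => rw [pvCollect]
  simp [hi, hm]

theorem pvCollect_eq_neg (m : Int → Bool) (endA i : Int) (hi : i < endA) (hm : m i = false) :
    pvCollect m endA i = pvCollect m endA (i + 1) := by
  conv_lhs => rw [pvCollect]
  simp [hi, hm]

theorem pvCollect_eq_end (m : Int → Bool) (endA i : Int) (hi : ¬ i < endA) :
    pvCollect m endA i = [] := by
  conv_lhs => rw [pvCollect]
  simp [hi]

theorem pvScanRun_eq_pos (m : Int → Bool) (endA j : Int) (h1 : j < endA) (h2 : m j = true) :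
    pvScanRun m endA j = pvScanRun m endA (j + 1) := by
  conv_lhs => rw [pvScanRun]
  simp [h1, h2]

theorem pvScanRun_eq_neg (m : Int → Bool) (endA j : Int) (h : ¬ (j < endA ∧ m j = true)) :
    pvScanRun m endA j = j := by
  conv_lhs => rw [pvScanRun]
  simp only [h, dif_neg, not_false_iff]

-- every collected segment starts at or after the scan position
theorem pvCollect_start_ge (m : Int → Bool) (endA i : Int) :
    ∀ seg ∈ pvCollect m endA i, i ≤ seg.2 := by
  fun_induction pvCollect m endA i with
  | case1 i hi hm j ih =>
      intro seg hseg
      rcases List.mem_cons.mp hseg with h | h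
      · subst h; simp
      · have := ih seg h
        have := le_pvScanRun m endA i
        simp only [j] at *
        omega
  | case2 i hi hm ih =>
      intro seg hseg
      have := ih seg hseg; omega
  | case3 i hi =>
      intro seg hseg
      simp at hseg

-- every collected segment has positive length
theorem pvCollect_len_pos (m : Int → Bool) (endA i : Int) :
    ∀ seg ∈ pvCollect m endA i, 1 ≤ seg.1 := by
  fun_induction pvCollect m endA i with
  | case1 i hi hm j ih =>
      intro seg hseg
      rcases List.mem_cons.mp hseg with h | h
      · subst h
        have := lt_pvScanRun m endA i hi hm
        simp only [j] at *
        simp; omega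
      · exact ih seg h
  | case2 i hi hm ih => exact ih
  | case3 i hi => intro seg hseg; simp at hseg

-- a zero-length pending run at position i folds away
theorem pvMerge_zero (b : Int) (bs : Option Int) (i : Int) (L : List (Int × Int)) (hb : 0 ≤ b) :
    (pvMerge 0 i i L).foldl pvStepB (b, bs) = L.foldl pvStepB (b, bs) := by
  cases L with
  | nil => simp [pvMerge, pvStepB]; omega
  | cons hd tl =>
      obtain ⟨len, st⟩ := hd
      by_cases hst : st = i
      · subst hst; simp [pvMerge]
      · simp only [pvMerge, if_neg hst, List.foldl]
        have h0 : pvStepB (b, bs) (0, i) = (b, bs) := by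
          simp [pvStepB]; omega
        rw [h0]

-- a pending run the scan has already accounted for (r ≤ b) folds away
-- as long as no segment of L starts exactly at i
theorem pvMerge_drop (b r s i : Int) (bs : Option Int) (L : List (Int × Int))
    (hrb : r ≤ b) (hL : ∀ seg ∈ L, seg.2 ≠ i) :
    (pvMerge r s i L).foldl pvStepB (b, bs) = L.foldl pvStepB (b, bs) := by
  cases L with
  | nil => simp [pvMerge, pvStepB]; omega
  | cons hd tl =>
      obtain ⟨len, st⟩ := hd
      have hst : st ≠ i := hL (len, st) (by simp)
      simp only [pvMerge, if_neg hst, List.foldl]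
      have h0 : pvStepB (b, bs) (r, s) = (b, bs) := by
        simp [pvStepB]; omega
      rw [h0]

-- extending the pending run over a matching position i
theorem pvMerge_extend (m : Int → Bool) (endA r s i : Int)
    (hi : i < endA) (hm : m i = true) :
    pvMerge r s i (pvCollect m endA i) = pvMerge (r + 1) s (i + 1) (pvCollect m endA (i + 1)) := by
  rw [pvCollect_eq_pos m endA i hi hm]
  rw [pvScanRun_eq_pos m endA i hi hm]
  by_cases h1 : i + 1 < endA
  · by_cases h2 : m (i + 1) = true
    · rw [pvCollect_eq_pos m endA (i + 1) h1 h2]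
      simp [pvMerge]; omega
    · have h2' : m (i + 1) = false := by simpa using h2
      have hj2 : pvScanRun m endA (i + 1) = i + 1 := by
        apply pvScanRun_eq_neg; simp [h2']
      rw [hj2]
      rw [pvCollect_eq_neg m endA (i + 1) h1 h2']
      cases hL : pvCollect m endA (i + 1 + 1) with
      | nil => simp [pvMerge]
      | cons hd tl =>
          obtain ⟨len, st⟩ := hd
          have hst : i + 1 + 1 ≤ st := by
            have := pvCollect_start_ge m endA (i + 1 + 1) (len, st) (by rw [hL]; simp)
            exact this
          have hne : ¬ (st = i + 1) := by omega
          simp [pvMerge, hne]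
  · have hj2 : pvScanRun m endA (i + 1) = i + 1 := by
      apply pvScanRun_eq_neg; intro h; exact h1 h.1
    rw [hj2]
    rw [pvCollect_eq_end m endA (i + 1) h1]
    simp [pvMerge]

-- the crux: A's carried three-tuple scan over the range equals B's fold over the
-- (carry-merged) segment list of the same range
theorem pvMain (m : Int → Bool) : ∀ (n : Nat) (i b : Int) (bs : Option Int) (r : Int),
    0 ≤ b → 0 ≤ r → r ≤ b →
    (let t := (PySem.List.pyRange i (i + (n : Int)) 1).foldl (pvStepA m) (b, bs, r);
      (t.1, t.2.1))
    = (pvMerge r (i - r) i (pvCollect m (i + (n : Int)) i)).foldl pvStepB (b, bs) := by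
  intro n
  induction n with
  | zero =>
      intro i b bs r hb hr hrb
      have hrange : PySem.List.pyRange i (i + ((0:Nat) : Int)) 1 = [] := by
        simp [PySem.List.pyRange]
      have hcol : pvCollect m (i + ((0:Nat) : Int)) i = [] := by
        apply pvCollect_eq_end; omega
      rw [hrange, hcol]
      simp only [List.foldl, pvMerge]
      have h0 : pvStepB (b, bs) (r, i - r) = (b, bs) := by
        simp [pvStepB]; omega
      rw [h0]
  | succ n ih =>
      intro i b bs r hb hr hrb
      have hc : ((n + 1 : Nat) : Int) = (n : Int) + 1 := by push_cast; ring
      rw [hc]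
      have hlt : i < i + ((n : Int) + 1) := by omega
      rw [PySem.List.pyRange_one_cons hlt]
      have harith : i + ((n : Int) + 1) = (i + 1) + (n : Int) := by ring
      rw [harith]
      simp only [List.foldl]
      by_cases hm : m i = true
      · have hstep : pvStepA m (b, bs, r) i
            = if r + 1 > b then (r + 1, some (i - (r + 1) + 1), r + 1) else (b, bs, r + 1) := by
          simp [pvStepA, hm]
        rw [hstep]
        have hmerge := pvMerge_extend m ((i + 1) + (n : Int)) r (i - r) i (by omega) hm
        rw [hmerge]
        have hs : (i + 1) - (r + 1) = i - r := by ring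
        by_cases hcmp : r + 1 > b
        · rw [if_pos hcmp]
          have hih := ih (i + 1) (r + 1) (some (i - (r + 1) + 1)) (r + 1)
            (by omega) (by omega) (by omega)
          simp only at hih
          rw [hih, hs]
          have hbs : i - (r + 1) + 1 = i - r := by ring
          rw [hbs]
          cases hL : pvCollect m (i + 1 + (n : Int)) (i + 1) with
          | nil =>
              have hmm : pvMerge (r + 1) (i - r) (i + 1) ([] : List (Int × Int))
                  = [(r + 1, i - r)] := by
                simp [pvMerge]
              rw [hmm]
              simp only [List.foldl]
              have e1 : pvStepB (r + 1, some (i - r)) (r + 1, i - r) = (r + 1, some (i - r)) := by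
                simp [pvStepB]
              have e2 : pvStepB (b, bs) (r + 1, i - r) = (r + 1, some (i - r)) := by
                simp [pvStepB]; omega
              rw [e1, e2]
          | cons hd tl =>
              obtain ⟨len, st⟩ := hd
              by_cases hst : st = i + 1
              · subst hst
                have hlen : 1 ≤ len :=
                  pvCollect_len_pos m (i + 1 + (n : Int)) (i + 1) (len, i + 1) (by rw [hL]; simp)
                have hmm : pvMerge (r + 1) (i - r) (i + 1) ((len, i + 1) :: tl)
                    = (r + 1 + len, i - r) :: tl := by
                  simp [pvMerge]
                rw [hmm]
                simp only [List.foldl]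
                have e1 : pvStepB (r + 1, some (i - r)) (r + 1 + len, i - r)
                    = (r + 1 + len, some (i - r)) := by
                  simp [pvStepB, show r + 1 + len > r + 1 by omega]
                have e2 : pvStepB (b, bs) (r + 1 + len, i - r) = (r + 1 + len, some (i - r)) := by
                  simp [pvStepB]; omega
                rw [e1, e2]
              · have hmm : pvMerge (r + 1) (i - r) (i + 1) ((len, st) :: tl)
                    = (r + 1, i - r) :: (len, st) :: tl := by
                  simp [pvMerge, hst]
                rw [hmm]
                simp only [List.foldl]
                have e1 : pvStepB (r + 1, some (i - r)) (r + 1, i - r) = (r + 1, some (i - r)) := by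
                  simp [pvStepB]
                have e2 : pvStepB (b, bs) (r + 1, i - r) = (r + 1, some (i - r)) := by
                  simp [pvStepB]; omega
                rw [e1, e2]
        · rw [if_neg hcmp]
          have hih := ih (i + 1) b bs (r + 1) (by omega) (by omega) (by omega)
          simp only at hih
          rw [hih, hs]
      · have hm' : m i = false := by simpa using hm
        have hstep : pvStepA m (b, bs, r) i = (b, bs, 0) := by
          simp [pvStepA, hm']
        rw [hstep]
        have hih := ih (i + 1) b bs 0 hb (by omega) hb
        simp only at hih
        rw [hih]
        have hcol : pvCollect m ((i + 1) + (n : Int)) i = pvCollect m ((i + 1) + (n : Int)) (i + 1) := by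
          apply pvCollect_eq_neg _ _ _ (by omega) hm'
        rw [hcol]
        have hz : i + 1 - (0:Int) = i + 1 := by ring
        rw [hz]
        rw [pvMerge_zero _ _ _ _ hb]
        rw [pvMerge_drop b r (i - r) i bs _ hrb]
        intro seg hseg
        have := pvCollect_start_ge m ((i + 1) + (n : Int)) (i + 1) seg hseg
        omega

-- ===== VERDICT (by name: the statement is the Claim_ definition above) =====
theorem longest_contiguous_match_spec : Claim_equal_longest_contiguous_match := by
  intro invA invB offset _
  unfold Spec_longest_contiguous_match longest_contiguous_match longest_contiguous_match_alt
  set startA := max 0 (-offset) with hA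
  set endA := min (invA.length : Int) ((invB.length : Int) - offset) with hB
  by_cases hguard : endA ≤ startA
  · simp [hguard]
  · simp only [hguard, if_neg, not_false_iff]
    have hn : endA = startA + (((endA - startA).toNat : Nat) : Int) := by omega
    rw [pvCollectF_eq (pvMatch invA invB offset) endA (endA - startA).toNat startA (by omega)]
    have hmain := pvMain (pvMatch invA invB offset) (endA - startA).toNat startA 0 none 0
      le_rfl le_rfl le_rfl
    rw [← hn] at hmain
    simp only at hmain
    rw [hmain]
    have hz : startA - (0:Int) = startA := by ring
    rw [hz]
    exact pvMerge_zero 0 none startA _ le_rfl
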